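-- pv_equiv track=rewrite | github.com/enhulsman/bible-tui | tools/convert_hsv.py | rejoin_hyphenated
-- ===== SOURCE A (Python) =====
-- def rejoin_hyphenated(lines):
--     """Rejoin hyphenated line breaks: 'word-\\nrest' -> 'wordrest'."""
--     result = []
--     i = 0
--     while i < len(lines):
--         line = lines[i]
--         while (i + 1 < len(lines) and line.endswith('-')
--                and lines[i + 1] and lines[i + 1][0].islower()):
--             line = line[:-1] + lines[i + 1]
--             i += 1
--         result.append(line)
--         i += 1
--     return result
-- ===== SOURCE B (Python) =====
-- def rejoin_hyphenated(lines):
--     """Rejoin hyphenated line breaks: 'word-\nrest' -> 'wordrest'."""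
--     result = []
--     for line in lines:
--         if result and result[-1].endswith('-') and line and line[0].islower():
--             result[-1] = result[-1][:-1] + line
--         else:
--             result.append(line)
--     return result
-- ===== Notes on version B (the rewrite author's own statement) =====
-- stated objective: simpler
-- what changed: Replaces the index-based outer-while with nested inner-while by a single forward for-loop that keeps the in-progress merge as result[-1], updating it in place; no index arithmetic and no nested loop.
import Mathlib
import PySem

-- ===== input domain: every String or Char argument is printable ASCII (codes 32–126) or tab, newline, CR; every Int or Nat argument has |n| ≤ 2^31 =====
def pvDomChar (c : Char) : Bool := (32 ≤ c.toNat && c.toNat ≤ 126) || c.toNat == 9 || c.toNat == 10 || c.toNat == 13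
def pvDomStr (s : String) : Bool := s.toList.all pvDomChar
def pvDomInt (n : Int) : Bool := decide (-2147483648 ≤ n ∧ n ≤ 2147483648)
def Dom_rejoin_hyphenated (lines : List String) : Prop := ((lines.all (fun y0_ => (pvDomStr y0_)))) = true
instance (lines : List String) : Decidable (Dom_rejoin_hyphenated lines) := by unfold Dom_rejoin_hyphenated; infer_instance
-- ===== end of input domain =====

-- B replaces A's index-based nested while loops by one forward pass that keeps the
-- in-progress merge as the last element of the result list (objective: simpler).

-- ===== PORT A =====
-- A's inner while: merge following lines into `line` while the guard holds;
-- returns the merged line and the remaining suffix of `lines` (from index i+1 on).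
def rejoinInnerA : String → List String → String × List String
  | line, [] => (line, [])
  | line, next :: tl =>
    if PySem.Str.endswith line "-" && next != "" &&
        ((PySem.Str.pyGet? next 0).map PySem.Chars.islower).getD false then
      rejoinInnerA (PySem.Str.slice line none (some (-1)) ++ next) tl
    else (line, next :: tl)

theorem rejoinInnerA_snd_length : ∀ (line : String) (rest : List String),
    (rejoinInnerA line rest).2.length ≤ rest.length := by
  intro line rest
  induction rest generalizing line with
  | nil => simp [rejoinInnerA]
  | cons next tl ih =>
    simp only [rejoinInnerA]
    split
    · exact le_trans (ih _) (by simp)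
    · simp

-- A's outer while over index i, as recursion on the suffix lines[i:].
def rejoin_hyphenated (lines : List String) : List String :=
  match lines with
  | [] => []
  | l :: tl =>
    let p := rejoinInnerA l tl
    p.1 :: rejoin_hyphenated p.2
termination_by lines.length
decreasing_by
  have := rejoinInnerA_snd_length l tl
  simp; omega

-- ===== PORT B =====
-- one step of B's for-loop over `lines`, accumulator = result list
def altStep (result : List String) (line : String) : List String :=
  if !result.isEmpty && PySem.Str.endswith (PySem.List.pyGetD result (-1) "") "-" &&
      line != "" && ((PySem.Str.pyGet? line 0).map PySem.Chars.islower).getD false then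
    result.dropLast ++ [PySem.Str.slice (PySem.List.pyGetD result (-1) "") none (some (-1)) ++ line]
  else result ++ [line]

def rejoin_hyphenated_alt (lines : List String) : List String :=
  lines.foldl altStep []

-- ===== PRECONDITION & SPEC =====
def Spec_rejoin_hyphenated (lines : List String) (out : List String) : Prop := out = rejoin_hyphenated_alt lines
instance (lines : List String) (out : List String) : Decidable (Spec_rejoin_hyphenated lines out) := by unfold Spec_rejoin_hyphenated; infer_instance

-- ===== CLAIM (what is proved, stated in full; the proofs are below) =====
def Claim_equal_rejoin_hyphenated : Prop := ∀ (lines : List String), Dom_rejoin_hyphenated lines → Spec_rejoin_hyphenated lines (rejoin_hyphenated lines)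

-- ===== LEMMAS AND PROOFS =====

theorem altStep_append_singleton (acc : List String) (cur line : String) :
    altStep (acc ++ [cur]) line =
      if PySem.Str.endswith cur "-" && line != "" &&
          ((PySem.Str.pyGet? line 0).map PySem.Chars.islower).getD false then
        acc ++ [PySem.Str.slice cur none (some (-1)) ++ line]
      else (acc ++ [cur]) ++ [line] := by
  unfold altStep
  simp [PySem.List.pyGetD_neg_one_append_singleton]

theorem foldl_altStep_main : ∀ (rest acc : List String) (cur : String),
    List.foldl altStep (acc ++ [cur]) rest =
      acc ++ ((rejoinInnerA cur rest).1 :: rejoin_hyphenated (rejoinInnerA cur rest).2) := by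
  intro rest
  induction rest with
  | nil =>
    intro acc cur
    simp [rejoinInnerA, rejoin_hyphenated]
  | cons next tl ih =>
    intro acc cur
    simp only [List.foldl_cons, altStep_append_singleton, rejoinInnerA]
    split
    · exact ih acc _
    · rw [ih (acc ++ [cur]) next]
      simp [rejoin_hyphenated]

-- ===== VERDICT (by name: the statement is the Claim_ definition above) =====
theorem rejoin_hyphenated_spec : Claim_equal_rejoin_hyphenated := by
  intro lines _
  unfold Spec_rejoin_hyphenated rejoin_hyphenated_alt
  cases lines with
  | nil => simp [rejoin_hyphenated]
  | cons l tl =>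
    have h := foldl_altStep_main tl [] l
    simpa [rejoin_hyphenated] using h.symm
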